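-- pv_equiv track=rewrite | github.com/david11rsww/epub2gitbook | split4.py | getmdpre
-- ===== SOURCE A (Python) =====
-- def getmd(mdlist):
--     md = []
--     for i in range(len(mdlist)):
--         if (i!=0) and (i%2 == 0):
--             md.append(mdlist[i])
--     return md
--
-- def getmdpre(mdlist):
--     mdpre = []
--     for md in mdlist:
--         if len(md)==1:
--             mdpre.append([])
--         else:
--             mdpre.append(getmd(md))
--     return mdpre
-- ===== SOURCE B (Python) =====
-- def getmdpre(mdlist):
--     return [md[2::2] for md in mdlist]
-- ===== Notes on version B (the rewrite author's own statement) =====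
-- stated objective: simpler
-- what changed: Replaced the two-function structure (per-element index loop with a parity test, plus a special len==1 branch) by a single stride-slice comprehension [md[2::2] for md in mdlist]; the len==1 branch is shown redundant.
import Mathlib
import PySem

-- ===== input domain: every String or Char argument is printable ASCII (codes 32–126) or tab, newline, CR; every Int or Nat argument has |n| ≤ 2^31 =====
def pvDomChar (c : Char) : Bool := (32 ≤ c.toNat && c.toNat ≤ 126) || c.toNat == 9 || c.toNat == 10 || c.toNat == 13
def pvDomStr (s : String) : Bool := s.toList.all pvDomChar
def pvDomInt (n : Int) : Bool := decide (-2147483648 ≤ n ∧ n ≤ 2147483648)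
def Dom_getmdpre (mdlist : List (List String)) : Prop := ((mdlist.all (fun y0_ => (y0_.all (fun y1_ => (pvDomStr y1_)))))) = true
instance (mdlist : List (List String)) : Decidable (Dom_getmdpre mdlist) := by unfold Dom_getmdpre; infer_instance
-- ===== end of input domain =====

-- B replaces A's helper-with-index-loop and its redundant len==1 branch by one stride-slice comprehension (same cost, simpler).


-- ===== PORT A =====
-- helper getmd: index loop keeping i with i != 0 and i % 2 == 0
def getmd_py (mdlist : List String) : List String :=
  (PySem.List.pyRange 0 (mdlist.length : Int) 1).foldl
    (fun md i =>
      if (i != 0) && (PySem.Int.mod i 2 == 0) then md ++ [PySem.List.pyGetD mdlist i ""] else md)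
    []

def getmdpre (mdlist : List (List String)) : List (List String) :=
  mdlist.foldl
    (fun mdpre md =>
      if md.length == 1 then mdpre ++ [([] : List String)] else mdpre ++ [getmd_py md])
    []

-- ===== PORT B =====
def getmdpre_alt (mdlist : List (List String)) : List (List String) :=
  mdlist.map (fun md => (PySem.List.slice? md (some 2) none 2).getD [])

-- ===== PRECONDITION & SPEC =====
def Spec_getmdpre (mdlist : List (List String)) (out : List (List String)) : Prop := out = getmdpre_alt mdlist
instance (mdlist : List (List String)) (out : List (List String)) : Decidable (Spec_getmdpre mdlist out) := by unfold Spec_getmdpre; infer_instance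

-- ===== CLAIM (what is proved, stated in full; the proofs are below) =====
def Claim_equal_getmdpre : Prop := ∀ (mdlist : List (List String)), Dom_getmdpre mdlist → Spec_getmdpre mdlist (getmdpre mdlist)

-- ===== LEMMAS AND PROOFS =====

-- canonical form of one output row: the elements of md at indices 2, 4, 6, …
def canon (md : List String) : List String :=
  (List.range ((md.length - 1) / 2)).filterMap (fun k => md[2 + 2 * k]?)

lemma range_filter (n : ℕ) :
    (PySem.List.pyRange 0 (n : Int) 1).filter (fun i => (i != 0) && (PySem.Int.mod i 2 == 0))
      = (List.range ((n - 1) / 2)).map (fun k => ((2 + 2 * k : ℕ) : Int)) := by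
  induction n with
  | zero => simp [PySem.List.pyRange_one_eq_nil]
  | succ n ih =>
    have h : ((n + 1 : ℕ) : Int) = (n : Int) + 1 := by push_cast; ring
    rw [h, PySem.List.pyRange_one_succ_right (by positivity), List.filter_append, ih,
      List.filter_singleton]
    have hm : PySem.Int.mod (n : Int) 2 = (n : Int) % 2 := by
      simp [PySem.Int.mod, Int.fmod_eq_emod]
    by_cases h0 : n ≠ 0 ∧ n % 2 = 0
    · have hc : (((n : Int) != 0) && (PySem.Int.mod (n : Int) 2 == 0)) = true := by
        rw [hm]; simp; omega
      have hr : (n + 1 - 1) / 2 = (n - 1) / 2 + 1 := by omega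
      rw [hc, hr, List.range_succ, List.map_append]
      simp only [cond_true, List.map_cons, List.map_nil]
      congr 2
      omega
    · have hc : (((n : Int) != 0) && (PySem.Int.mod (n : Int) 2 == 0)) = false := by
        rw [hm]; simp; omega
      have hr : (n + 1 - 1) / 2 = (n - 1) / 2 := by omega
      rw [hc, hr]
      simp

lemma getmd_eq_canon (md : List String) : getmd_py md = canon md := by
  unfold getmd_py canon
  rw [PySem.List.foldl_append_if, range_filter, List.map_map, List.nil_append]
  rw [List.filterMap_congr (g := fun k => some (md.getD (2 + 2 * k) ""))
    (by
      intro x hx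
      rw [List.mem_range] at hx
      have hlt : 2 + 2 * x < md.length := by omega
      simp [List.getElem?_eq_getElem hlt])]
  rw [show (fun k => some (md.getD (2 + 2 * k) "")) = some ∘ (fun k => md.getD (2 + 2 * k) "") from rfl,
    List.filterMap_eq_map]
  refine List.map_congr_left ?_
  intro x hx
  simp only [Function.comp_apply]
  rw [PySem.List.pyGetD_natCast]

lemma alt_elem_eq_canon (md : List String) :
    (PySem.List.slice? md (some 2) none 2).getD [] = canon md := by
  unfold canon
  simp only [PySem.List.slice?, PySem.List.sliceIndices]
  norm_num
  by_cases h : 2 < md.length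
  · rw [if_pos h]
    have h1 : (((md.length : Int) - min 2 (md.length : Int) + 2 - 1) / 2).toNat = (md.length - 1) / 2 := by
      omega
    rw [h1]
    refine List.filterMap_congr ?_
    intro x hx
    have h2 : (min 2 (md.length : Int) + 2 * (x : Int)).toNat = 2 + 2 * x := by omega
    rw [h2]
  · rw [if_neg h]
    have h2 : (md.length - 1) / 2 = 0 := by omega
    rw [h2]
    simp

-- ===== VERDICT (by name: the statement is the Claim_ definition above) =====
theorem getmdpre_spec : Claim_equal_getmdpre := by
  intro mdlist _
  unfold Spec_getmdpre getmdpre getmdpre_alt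
  have hbody : ∀ (acc : List (List String)) (md : List String), md ∈ mdlist →
      (if (md.length == 1) = true then acc ++ [([] : List String)] else acc ++ [getmd_py md])
        = acc ++ [(PySem.List.slice? md (some 2) none 2).getD []] := by
    intro acc md _
    rw [alt_elem_eq_canon]
    by_cases h1 : md.length = 1
    · have : canon md = [] := by unfold canon; rw [h1]; simp
      simp [h1, this]
    · simp [h1, getmd_eq_canon]
  rw [PySem.List.foldl_congr_mem mdlist _
      (fun acc md => acc ++ [(PySem.List.slice? md (some 2) none 2).getD []]) [] hbody,
    PySem.List.foldl_append_singleton_eq_map, List.nil_append]
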